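-- pv_equiv track=rewrite | github.com/avgjoe1017/et-heatmap-v2 | src/resolution/entity_resolver.py | choose_primary_focus
-- ===== SOURCE A (Python) =====
-- from typing import List, Dict, Optional, Tuple, Any
--
-- def choose_primary_focus(
--     focus_entity_ids: List[str],
--     recency_order: List[str],
-- ) -> Optional[str]:
--     """
--     Deterministic focus: most recent entity mentioned (recency wins).
--     You can enhance with repetition counts later.
--     """
--     if not focus_entity_ids:
--         return None
--     # recency_order already ordered by most recent first
--     for eid in recency_order:
--         if eid in focus_entity_ids:
--             return eid
--     return focus_entity_ids[-1]
-- ===== SOURCE B (Python) =====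
-- from typing import List, Optional
--
--
-- def choose_primary_focus(
--     focus_entity_ids: List[str],
--     recency_order: List[str],
-- ) -> Optional[str]:
--     if not focus_entity_ids:
--         return None
--     # index table: eid -> first (most recent) position in recency_order
--     rank = {}
--     for i, eid in enumerate(recency_order):
--         if eid not in rank:
--             rank[eid] = i
--     best = None  # (rank, eid) with the smallest rank seen so far
--     for eid in focus_entity_ids:
--         r = rank.get(eid)
--         if r is not None and (best is None or r < best[0]):
--             best = (r, eid)
--     return best[1] if best is not None else focus_entity_ids[-1]
-- ===== Notes on version B (the rewrite author's own statement) =====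
-- stated objective: alternative
-- what changed: Replaces A's scan of recency_order with a per-element membership test by a precomputed first-occurrence index dict over recency_order plus a single min-rank pass over focus_entity_ids.
import Mathlib
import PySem

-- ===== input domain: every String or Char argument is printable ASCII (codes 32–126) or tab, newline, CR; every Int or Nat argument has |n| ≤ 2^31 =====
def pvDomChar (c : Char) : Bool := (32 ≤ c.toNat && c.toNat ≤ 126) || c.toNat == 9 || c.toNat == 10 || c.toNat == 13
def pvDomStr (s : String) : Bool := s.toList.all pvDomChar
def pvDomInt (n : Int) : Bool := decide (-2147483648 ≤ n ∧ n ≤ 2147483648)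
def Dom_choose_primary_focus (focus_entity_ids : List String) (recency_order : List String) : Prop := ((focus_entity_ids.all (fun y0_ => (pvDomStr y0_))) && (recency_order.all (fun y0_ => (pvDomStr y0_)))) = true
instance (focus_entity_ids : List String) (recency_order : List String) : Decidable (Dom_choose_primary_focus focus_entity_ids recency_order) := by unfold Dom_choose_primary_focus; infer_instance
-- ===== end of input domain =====

-- B replaces A's per-element membership scan over recency_order with a first-occurrence
-- index dict over recency_order and a single min-rank pass over focus_entity_ids (objective: alternative).

-- ===== PORT A =====
-- the 'for eid in recency_order: if eid in focus_entity_ids: return eid' loop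
def aLoop (focus_entity_ids : List String) : List String → Option String
  | [] => none
  | eid :: rest =>
    if eid ∈ focus_entity_ids then some eid else aLoop focus_entity_ids rest

def choose_primary_focus (focus_entity_ids : List String) (recency_order : List String) : Option String :=
  if focus_entity_ids.isEmpty then none
  else
    match aLoop focus_entity_ids recency_order with
    | some eid => some eid
    | none => PySem.List.pyGet? focus_entity_ids (-1)

-- ===== PORT B =====
-- rank = {}; for i, eid in enumerate(recency_order): if eid not in rank: rank[eid] = i
def buildRank (recency_order : List String) : PySem.Dict String Int :=
  (PySem.List.enumerate recency_order).foldl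
    (fun d p => if d.contains p.2 then d else d.insert p.2 p.1) PySem.Dict.empty

-- the 'for eid in focus_entity_ids: …' loop keeping best = (rank, eid) with smallest rank
def bLoop (rank : PySem.Dict String Int) : List String → Option (Int × String) → Option (Int × String)
  | [], best => best
  | eid :: rest, best =>
    match rank.get? eid with
    | none => bLoop rank rest best
    | some r =>
      match best with
      | none => bLoop rank rest (some (r, eid))
      | some b => if r < b.1 then bLoop rank rest (some (r, eid)) else bLoop rank rest best

def choose_primary_focus_alt (focus_entity_ids : List String) (recency_order : List String) : Option String :=
  if focus_entity_ids.isEmpty then none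
  else
    match bLoop (buildRank recency_order) focus_entity_ids none with
    | some b => some b.2
    | none => PySem.List.pyGet? focus_entity_ids (-1)

-- ===== PRECONDITION & SPEC =====
def Spec_choose_primary_focus (focus_entity_ids : List String) (recency_order : List String) (out : Option String) : Prop := out = choose_primary_focus_alt focus_entity_ids recency_order
instance (focus_entity_ids : List String) (recency_order : List String) (out : Option String) : Decidable (Spec_choose_primary_focus focus_entity_ids recency_order out) := by unfold Spec_choose_primary_focus; infer_instance

-- ===== CLAIM (what is proved, stated in full; the proofs are below) =====
def Claim_equal_choose_primary_focus : Prop := ∀ (focus_entity_ids : List String) (recency_order : List String), Dom_choose_primary_focus focus_entity_ids recency_order → Spec_choose_primary_focus focus_entity_ids recency_order (choose_primary_focus focus_entity_ids recency_order)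

-- ===== LEMMAS AND PROOFS =====

-- the rank dict maps each eid to (the Int cast of) its first index in recency_order
theorem rank_get_aux (e : String) :
    ∀ (r : List String) (s : Int) (d : PySem.Dict String Int),
      ((PySem.List.enumerate r s).foldl
          (fun d p => if d.contains p.2 then d else d.insert p.2 p.1) d).get? e =
        match d.get? e with
        | some v => some v
        | none => (PySem.List.index? r e).map (fun (j : Nat) => s + (j : Int)) := by
  intro r
  induction r with
  | nil =>
    intro s d
    simp only [PySem.List.enumerate_nil, List.foldl_nil]
    cases d.get? e <;> simp
  | cons x xs ih =>
    intro s d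
    rw [PySem.List.enumerate_cons]
    simp only [List.foldl_cons]
    by_cases hc : d.contains x = true
    · rw [if_pos hc, ih]
      by_cases hex : e = x
      · subst hex
        have : (d.get? e).isSome := by
          rw [← PySem.Dict.contains_eq_isSome_get?]; exact hc
        obtain ⟨v, hv⟩ := Option.isSome_iff_exists.mp this
        simp [hv]
      · rw [PySem.List.index?_cons_of_ne xs (fun h => hex h.symm)]
        cases hd : d.get? e with
        | some v => simp
        | none =>
          cases hj : PySem.List.index? xs e with
          | none => simp
          | some j => simp; ring
    · rw [if_neg hc, ih]
      by_cases hex : e = x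
      · subst hex
        have hd : d.get? e = none := by
          rw [PySem.Dict.get?_eq_none_iff_contains]
          simpa using hc
        rw [PySem.Dict.get?_insert_self, hd, PySem.List.index?_cons_self]
        simp
      · rw [PySem.Dict.get?_insert_of_ne d s hex,
          PySem.List.index?_cons_of_ne xs (fun h => hex h.symm)]
        cases hd : d.get? e with
        | some v => simp
        | none =>
          cases hj : PySem.List.index? xs e with
          | none => simp
          | some j => simp; ring

theorem rank_get (r : List String) (e : String) :
    (buildRank r).get? e = (PySem.List.index? r e).map (fun (j : Nat) => (j : Int)) := by
  unfold buildRank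
  rw [rank_get_aux]
  simp [PySem.Dict.get?_empty]

-- if no eid of f is ranked, the best-loop keeps its accumulator
theorem bLoop_none (rank : PySem.Dict String Int) :
    ∀ (f : List String) (best : Option (Int × String)),
      (∀ e ∈ f, rank.get? e = none) → bLoop rank f best = best := by
  intro f
  induction f with
  | nil => intro best _; rfl
  | cons e rest ih =>
    intro best h
    have he := h e (by simp)
    simp only [bLoop, he]
    exact ih best (fun x hx => h x (by simp [hx]))

-- if a ∈ f has the strictly smallest rank among ranked eids of f, the best-loop returns (rank a, a)
theorem bLoop_min (rank : PySem.Dict String Int) (a : String) (iA : Int) :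
    ∀ (f : List String) (best : Option (Int × String)),
      (∀ e i, e ∈ f → rank.get? e = some i → iA ≤ i ∧ (i = iA → e = a)) →
      ((a ∈ f ∧ rank.get? a = some iA) ∨ best = some (iA, a)) →
      (∀ b i, best = some (i, b) → rank.get? b = some i ∧ iA ≤ i ∧ (i = iA → b = a)) →
      bLoop rank f best = some (iA, a) := by
  intro f
  induction f with
  | nil =>
    intro best _ hmem _
    rcases hmem with ⟨hin, _⟩ | hb
    · exact absurd hin (List.not_mem_nil)
    · simpa [bLoop] using hb
  | cons e rest ih =>
    intro best hlb hmem hbest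
    simp only [bLoop]
    cases hre : rank.get? e with
    | none =>
      dsimp only
      apply ih
      · exact fun x i hx => hlb x i (by simp [hx])
      · rcases hmem with ⟨hin, ha⟩ | hb
        · rcases List.mem_cons.mp hin with rfl | hin'
          · rw [hre] at ha; exact absurd ha (by simp)
          · exact Or.inl ⟨hin', ha⟩
        · exact Or.inr hb
      · exact hbest
    | some ri =>
      obtain ⟨hlbe, heq⟩ := hlb e ri (by simp) hre
      cases best with
      | none =>
        dsimp only
        apply ih
        · exact fun x i hx => hlb x i (by simp [hx])
        · rcases hmem with ⟨hin, ha⟩ | hb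
          · rcases List.mem_cons.mp hin with rfl | hin'
            · have hri : ri = iA := by
                rw [hre] at ha; exact Option.some.inj ha
              subst hri
              exact Or.inr rfl
            · exact Or.inl ⟨hin', ha⟩
          · simp at hb
        · intro b i hb
          obtain ⟨rfl, rfl⟩ : i = ri ∧ b = e := by
            have := Option.some.inj hb
            exact ⟨congrArg Prod.fst this.symm, congrArg Prod.snd this.symm⟩
          exact ⟨hre, hlbe, heq⟩
      | some bb =>
        obtain ⟨hrb, hlbb, heqb⟩ := hbest bb.2 bb.1 (by simp)
        dsimp only
        by_cases hcmp : ri < bb.1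
        · rw [if_pos hcmp]
          apply ih
          · exact fun x i hx => hlb x i (by simp [hx])
          · rcases hmem with ⟨hin, ha⟩ | hb
            · rcases List.mem_cons.mp hin with rfl | hin'
              · have hri : ri = iA := by
                  rw [hre] at ha; exact Option.some.inj ha
                subst hri
                exact Or.inr rfl
              · exact Or.inl ⟨hin', ha⟩
            · -- best = (iA, a): then bb.1 = iA ≤ ri, contradicting ri < bb.1
              have h1 : bb.1 = iA := by
                have := Option.some.inj hb
                exact congrArg Prod.fst this
              omega
          · intro b i hb
            obtain ⟨rfl, rfl⟩ : i = ri ∧ b = e := by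
              have := Option.some.inj hb
              exact ⟨congrArg Prod.fst this.symm, congrArg Prod.snd this.symm⟩
            exact ⟨hre, hlbe, heq⟩
        · rw [if_neg hcmp]
          apply ih
          · exact fun x i hx => hlb x i (by simp [hx])
          · rcases hmem with ⟨hin, ha⟩ | hb
            · rcases List.mem_cons.mp hin with rfl | hin'
              · have hri : ri = iA := by
                  rw [hre] at ha; exact Option.some.inj ha
                have hbbA : bb.1 = iA := by omega
                have hba : bb.2 = a := heqb hbbA
                right
                rw [show bb = (iA, a) from Prod.ext hbbA hba]
              · exact Or.inl ⟨hin', ha⟩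
            · exact Or.inr hb
          · intro b i hb
            obtain ⟨rfl, rfl⟩ : i = bb.1 ∧ b = bb.2 := by
              have := Option.some.inj hb
              exact ⟨congrArg Prod.fst this.symm, congrArg Prod.snd this.symm⟩
            exact ⟨hrb, hlbb, heqb⟩

-- A's scan finding nothing means no eid of f occurs in r
theorem aLoop_eq_none (f : List String) :
    ∀ (r : List String), aLoop f r = none → ∀ e ∈ f, e ∉ r := by
  intro r
  induction r with
  | nil => intro _ e _; simp
  | cons x xs ih =>
    intro h e he
    simp only [aLoop] at h
    by_cases hc : x ∈ f
    · rw [if_pos hc] at h; exact absurd h (by simp)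
    · rw [if_neg hc] at h
      intro hmem
      rcases List.mem_cons.mp hmem with rfl | hmem'
      · exact hc he
      · exact ih h e he hmem'

-- A's scan returning a: a ∈ f, a occurs first at index iA, and iA is the unique minimum
-- first-occurrence index among eids of f
theorem aLoop_eq_some (f : List String) :
    ∀ (r : List String) (a : String), aLoop f r = some a →
      a ∈ f ∧ ∃ iA : Nat, PySem.List.index? r a = some iA ∧
        ∀ e j, e ∈ f → PySem.List.index? r e = some j → iA ≤ j ∧ (j = iA → e = a) := by
  intro r
  induction r with
  | nil => intro a h; simp [aLoop] at h
  | cons x xs ih =>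
    intro a h
    simp only [aLoop] at h
    by_cases hc : x ∈ f
    · rw [if_pos hc] at h
      have hax : a = x := (Option.some.inj h).symm
      subst hax
      refine ⟨hc, 0, PySem.List.index?_cons_self _ _, ?_⟩
      intro e j _ hj
      refine ⟨Nat.zero_le j, fun hj0 => ?_⟩
      subst hj0
      obtain ⟨hk, hval, _⟩ := PySem.List.getElem_of_index?_eq_some hj
      simpa using hval.symm
    · rw [if_neg hc] at h
      obtain ⟨haf, iA', hidx, hmin⟩ := ih a h
      have hxa : x ≠ a := fun hxe => hc (hxe ▸ haf)
      refine ⟨haf, iA' + 1, ?_, ?_⟩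
      · rw [PySem.List.index?_cons_of_ne xs hxa, hidx]; rfl
      · intro e j he hj
        have hxe : x ≠ e := fun hh => hc (hh ▸ he)
        rw [PySem.List.index?_cons_of_ne xs hxe] at hj
        cases hj' : PySem.List.index? xs e with
        | none => rw [hj'] at hj; simp at hj
        | some j' =>
          rw [hj'] at hj
          simp at hj
          obtain ⟨h1, h2⟩ := hmin e j' he hj'
          exact ⟨by omega, fun hje => h2 (by omega)⟩

-- ===== VERDICT (by name: the statement is the Claim_ definition above) =====
theorem choose_primary_focus_spec : Claim_equal_choose_primary_focus := by
  intro f r _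
  unfold Spec_choose_primary_focus choose_primary_focus choose_primary_focus_alt
  by_cases hf : f.isEmpty
  · simp [hf]
  · rw [if_neg hf, if_neg hf]
    cases hA : aLoop f r with
    | none =>
      have hB : bLoop (buildRank r) f none = none := by
        apply bLoop_none
        intro e he
        rw [rank_get r e,
          (PySem.List.index?_eq_none_iff r e).mpr (aLoop_eq_none f r hA e he)]
        rfl
      rw [hB]
    | some a =>
      obtain ⟨haf, iA, hidx, hmin⟩ := aLoop_eq_some f r a hA
      have hB : bLoop (buildRank r) f none = some ((iA : Int), a) := by
        apply bLoop_min (buildRank r) a (iA : Int) f none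
        · intro e i he hi
          rw [rank_get r e] at hi
          cases hj : PySem.List.index? r e with
          | none => rw [hj] at hi; simp at hi
          | some j =>
            rw [hj] at hi
            simp at hi
            obtain ⟨h1, h2⟩ := hmin e j he hj
            exact ⟨by omega, fun hij => h2 (by omega)⟩
        · exact Or.inl ⟨haf, by rw [rank_get r a, hidx]; rfl⟩
        · intro b i hb; simp at hb
      rw [hB]
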